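-- pv_equiv track=rewrite | github.com/tigcho/aoc-2024 | day09/diskfrag.py | find_leftmost_space_for_file
-- ===== SOURCE A (Python) =====
-- def find_leftmost_space_for_file(blocks, file_length):
--     count = 0
--     start = 0
--
--     for i in range(len(blocks)):
--         if blocks[i] == '.':
--             if count == 0:
--                 start = i
--             count += 1
--             if count == file_length:
--                 return start
--         else:
--             count = 0
--
--     return -1
-- ===== SOURCE B (Python) =====
-- def find_leftmost_space_for_file(blocks, file_length):
--     if file_length <= 0:
--         return -1
--     i = 0
--     n = len(blocks)
--     while i < n:
--         j = i
--         while j < n and blocks[j] == blocks[i]: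
--             j += 1
--         if blocks[i] == '.' and j - i >= file_length:
--             return i
--         i = j
--     return -1
-- ===== Notes on version B (the rewrite author's own statement) =====
-- stated objective: alternative
-- what changed: B walks the list as maximal runs of equal blocks (run-length scan with two indices) and returns the start of the first '.'-run at least file_length long, instead of A's per-element counter with reset; non-positive file_length is rejected up front.
import Mathlib
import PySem

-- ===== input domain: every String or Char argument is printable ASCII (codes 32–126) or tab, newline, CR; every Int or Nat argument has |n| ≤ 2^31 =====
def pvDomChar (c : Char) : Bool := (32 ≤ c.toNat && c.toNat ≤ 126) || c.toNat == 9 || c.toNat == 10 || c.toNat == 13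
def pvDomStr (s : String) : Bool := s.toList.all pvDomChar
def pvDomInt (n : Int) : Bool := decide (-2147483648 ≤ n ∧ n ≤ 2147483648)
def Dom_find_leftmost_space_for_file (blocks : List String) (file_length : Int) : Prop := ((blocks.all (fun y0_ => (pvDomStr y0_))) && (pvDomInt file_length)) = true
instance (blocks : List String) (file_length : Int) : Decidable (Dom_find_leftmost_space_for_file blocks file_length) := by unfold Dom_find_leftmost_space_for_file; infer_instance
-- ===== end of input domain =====

-- B replaces A's per-element counter-with-reset by a run-length scan over maximal runs of
-- equal blocks (alternative decomposition, same O(n) cost); return values proved equal.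

-- ===== PORT A =====
-- A's for-loop over range(len(blocks)) with state (count, start) and early return,
-- transcribed as structural recursion over the list carrying the current index i.
def pvALoop (fl : Int) : List String → Int → Int → Int → Int
  | [], _, _, _ => -1
  | b :: rest, i, count, start =>
    if b = "." then
      let start' := if count = 0 then i else start
      let count' := count + 1
      if count' = fl then start' else pvALoop fl rest (i + 1) count' start'
    else
      pvALoop fl rest (i + 1) 0 start
def find_leftmost_space_for_file (blocks : List String) (file_length : Int) : Int :=
  pvALoop file_length blocks 0 0 0

-- ===== PORT B =====
-- B's outer while-loop: each step measures the maximal run of blocks equal to the head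
-- (inner while-loop = takeWhile) and either returns the run start or skips the whole run.
def pvBScan (fl : Int) : List String → Int → Int
  | [], _ => -1
  | b :: rest, i =>
    let k := (rest.takeWhile (fun x => x = b)).length
    if b = "." ∧ fl ≤ (k : Int) + 1 then i
    else pvBScan fl (rest.drop k) (i + (k : Int) + 1)
termination_by l _ => l.length
decreasing_by simp


def find_leftmost_space_for_file_alt (blocks : List String) (file_length : Int) : Int :=
  if file_length ≤ 0 then -1 else pvBScan file_length blocks 0

-- ===== PRECONDITION & SPEC =====
def Spec_find_leftmost_space_for_file (blocks : List String) (file_length : Int) (out : Int) : Prop := out = find_leftmost_space_for_file_alt blocks file_length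
instance (blocks : List String) (file_length : Int) (out : Int) : Decidable (Spec_find_leftmost_space_for_file blocks file_length out) := by unfold Spec_find_leftmost_space_for_file; infer_instance

-- ===== CLAIM (what is proved, stated in full; the proofs are below) =====
def Claim_equal_find_leftmost_space_for_file : Prop := ∀ (blocks : List String) (file_length : Int), Dom_find_leftmost_space_for_file blocks file_length → Spec_find_leftmost_space_for_file blocks file_length (find_leftmost_space_for_file blocks file_length)

-- ===== LEMMAS AND PROOFS =====

-- For non-positive file_length A's counter (always ≥ 1 after an increment) never equals it.
theorem pvALoop_nonpos (fl : Int) (hfl : fl ≤ 0) :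
    ∀ (l : List String) (i count start : Int), 0 ≤ count →
      pvALoop fl l i count start = -1 := by
  intro l
  induction l with
  | nil => intro i count start _; rfl
  | cons b rest ih =>
    intro i count start hc
    by_cases hb : b = "."
    · have hne : ¬ (count + 1 = fl) := by omega
      simp [pvALoop, hb, hne]
      exact ih _ _ _ (by omega)
    · simp [pvALoop, hb]
      exact ih _ _ _ (by omega)

-- B's scan may be advanced one element at a time through a non-'.' head.
theorem pvBScan_nondot (fl : Int) (b : String) (hb : b ≠ ".") (rest : List String) (i : Int) :
    pvBScan fl (b :: rest) i = pvBScan fl rest (i + 1) := by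
  cases rest with
  | nil => simp [pvBScan, hb]
  | cons c rest2 =>
    by_cases hc : c = b
    · subst hc
      simp [pvBScan, hb]
      ring_nf
    · simp [pvBScan, hb, hc]

theorem pvADotRun (fl : Int) (N : Nat)
    (ih : ∀ (l' : List String), l'.length < N → ∀ (i start : Int),
            pvALoop fl l' i 0 start = pvBScan fl l' i) :
    ∀ (rest : List String), rest.length < N → ∀ (i c start : Int), 1 ≤ c → c < fl →
      pvALoop fl rest i c start =
        if fl ≤ c + ((rest.takeWhile (fun x => x = ".")).length : Int) then start
        else pvBScan fl (rest.drop (rest.takeWhile (fun x => x = ".")).length)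
               (i + ((rest.takeWhile (fun x => x = ".")).length : Int)) := by
  intro rest
  induction rest with
  | nil =>
    intro _ i c start hc1 hcf
    simp [pvALoop, pvBScan]
    omega
  | cons b rest2 ihr =>
    intro hlen i c start hc1 hcf
    by_cases hb : b = "."
    · subst hb
      by_cases hdone : c + 1 = fl
      · have hTW : (((".":String) :: rest2).takeWhile (fun x => x = "."))
            = "." :: rest2.takeWhile (fun x => x = ".") := by
          simp
        have h : fl ≤ c + ((((".":String) :: rest2).takeWhile (fun x => x = ".")).length : Int) := by
          rw [hTW]; push_cast [List.length_cons]; omega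
        rw [if_pos h]
        simp [pvALoop, hdone, show ¬ (c = 0) by omega]
      · have hTW : (((".":String) :: rest2).takeWhile (fun x => x = "."))
            = "." :: rest2.takeWhile (fun x => x = ".") := by
          simp
        have hstep := ihr (by simp at hlen ⊢; omega) (i + 1) (c + 1) start (by omega) (by omega)
        have hA : pvALoop fl ((".":String) :: rest2) i c start
            = pvALoop fl rest2 (i + 1) (c + 1) start := by
          simp [pvALoop, hdone, show ¬ (c = 0) by omega]
        rw [hA, hstep, hTW]
        simp only [List.length_cons, List.drop_succ_cons]
        by_cases hle : fl ≤ c + 1 + ((rest2.takeWhile (fun x => x = ".")).length : Int)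
        · rw [if_pos hle, if_pos (by push_cast at hle ⊢; omega)]
        · rw [if_neg hle, if_neg (by push_cast at hle ⊢; omega)]
          push_cast
          ring_nf
    · have hk : ((b :: rest2).takeWhile (fun x => x = ".")).length = 0 := by
        simp [hb]
      rw [hk]
      simp only [List.drop_zero, Int.natCast_zero, Int.add_zero]
      rw [if_neg (by omega)]
      have hA : pvALoop fl (b :: rest2) i c start = pvALoop fl rest2 (i + 1) 0 start := by
        simp [pvALoop, hb]
      rw [hA, ih rest2 (by simp at hlen ⊢; omega) (i + 1) start,
          ← pvBScan_nondot fl b hb rest2 i]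

theorem pvMainEq (fl : Int) (hfl : 1 ≤ fl) :
    ∀ (l : List String) (i start : Int), pvALoop fl l i 0 start = pvBScan fl l i := by
  intro l
  induction hN : l.length using Nat.strong_induction_on generalizing l with
  | _ N ih =>
  subst hN
  cases l with
  | nil => intro i start; simp [pvALoop, pvBScan]
  | cons b rest =>
    intro i start
    have ih' : ∀ (l' : List String), l'.length < rest.length + 1 → ∀ (i start : Int),
        pvALoop fl l' i 0 start = pvBScan fl l' i := by
      intro l' hl' i' s'
      exact ih l'.length (by simpa using hl') l' rfl i' s'
    by_cases hb : b = "."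
    · subst hb
      by_cases h1 : (1:Int) = fl
      · have h : fl ≤ ((rest.takeWhile (fun x => x = ".")).length : Int) + 1 := by
          omega
        simp [pvALoop, pvBScan, h1.symm]
      · have hA : pvALoop fl ((".":String) :: rest) i 0 start
            = pvALoop fl rest (i + 1) 1 i := by
          simp [pvALoop, h1]
        have hrun := pvADotRun fl (rest.length + 1) ih' rest (by omega) (i + 1) 1 i
          (le_refl 1) (by omega)
        rw [hA, hrun]
        by_cases hle : fl ≤ 1 + ((rest.takeWhile (fun x => x = ".")).length : Int)
        · rw [if_pos hle]
          simp only [pvBScan]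
          rw [if_pos (And.intro trivial (by omega))]
        · rw [if_neg hle]
          simp only [pvBScan]
          rw [if_neg (by simp; omega)]
          ring_nf
    · rw [pvBScan_nondot fl b hb rest i]
      have hA : pvALoop fl (b :: rest) i 0 start = pvALoop fl rest (i + 1) 0 start := by
        simp [pvALoop, hb]
      rw [hA]
      exact ih' rest (by omega) (i + 1) start

-- ===== VERDICT (by name: the statement is the Claim_ definition above) =====
theorem find_leftmost_space_for_file_spec : Claim_equal_find_leftmost_space_for_file := by
  intro blocks fl _
  unfold Spec_find_leftmost_space_for_file find_leftmost_space_for_file find_leftmost_space_for_file_alt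
  by_cases h : fl ≤ 0
  · rw [if_pos h]; exact pvALoop_nonpos fl h blocks 0 0 0 (le_refl 0)
  · rw [if_neg h]; exact pvMainEq fl (by omega) blocks 0 0
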